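-- pv_equiv track=rewrite | github.com/ST4RKJR/Js- | 100DaysOfCode/Day23.py | magicalArrays
-- ===== SOURCE A (Python) =====
-- def magicalArrays(arr):
--     n = len(arr)
--     count = 0
--     i = 0
--
--     while i < n:
--         j = i
--         while j < n and arr[j] == arr[i]:
--             j += 1
--         length = j - i
--         count += (length * (length + 1)) // 2
--         i = j
--
--     return count
-- ===== SOURCE B (Python) =====
-- def magicalArrays(arr):
--     count = 0
--     run = 0
--     prev = None
--     for x in arr:
--         run = run + 1 if (prev is not None and x == prev) else 1
--         count += run
--         prev = x
--     return count
-- ===== Notes on version B (the rewrite author's own statement) =====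
-- stated objective: simpler
-- what changed: Replaced the nested index loops (inner while finding each run's end, then the closed-form length*(length+1)//2 per run) by a single flat pass that maintains the current run length and adds it to the count at every element.
import Mathlib
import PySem

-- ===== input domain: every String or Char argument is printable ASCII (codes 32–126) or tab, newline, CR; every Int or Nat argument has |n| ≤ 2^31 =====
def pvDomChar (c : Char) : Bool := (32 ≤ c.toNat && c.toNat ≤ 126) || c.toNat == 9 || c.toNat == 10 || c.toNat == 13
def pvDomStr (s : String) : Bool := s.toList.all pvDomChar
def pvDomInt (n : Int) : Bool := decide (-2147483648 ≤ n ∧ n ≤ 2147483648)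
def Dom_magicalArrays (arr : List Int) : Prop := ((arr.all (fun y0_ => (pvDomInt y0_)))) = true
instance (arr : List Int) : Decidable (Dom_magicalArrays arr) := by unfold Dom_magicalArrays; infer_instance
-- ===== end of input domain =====

-- B replaces A's nested loops with a closed form per run by one flat pass adding the current run length at each element (simpler, same cost).

-- ===== PORT A =====
-- inner 'while j < n and arr[j] == arr[i]' loop; the fuel argument only makes the loop total
-- (arr.length - j steps always suffice: the loop stops at j = n); each step is A's step exactly
def magicalArraysInner (arr : List Int) (v : Int) (j : Nat) : Nat → Nat
  | 0 => j
  | fuel + 1 =>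
    if j < arr.length ∧ arr.getD j 0 = v then magicalArraysInner arr v (j + 1) fuel else j

-- outer 'while i < n' loop carrying count; fuel (arr.length + 1 at the call) again only makes it total
def magicalArraysOuter (arr : List Int) (i : Nat) (count : Int) : Nat → Int
  | 0 => count
  | fuel + 1 =>
    if i < arr.length then
      let j := magicalArraysInner arr (arr.getD i 0) i (arr.length - i)
      let length : Int := (j : Int) - (i : Int)
      magicalArraysOuter arr j (count + PySem.Int.floordiv (length * (length + 1)) 2) fuel
    else count

def magicalArrays (arr : List Int) : Int :=
  magicalArraysOuter arr 0 0 (arr.length + 1)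

-- ===== PORT B =====
def magicalArrays_alt (arr : List Int) : Int :=
  (arr.foldl
    (fun (s : Option Int × Int × Int) x =>
      let run : Int := if some x = s.1 then s.2.1 + 1 else 1
      (some x, run, s.2.2 + run))
    (none, 0, 0)).2.2

-- ===== PRECONDITION & SPEC =====
def Spec_magicalArrays (arr : List Int) (out : Int) : Prop := out = magicalArrays_alt arr
instance (arr : List Int) (out : Int) : Decidable (Spec_magicalArrays arr out) := by unfold Spec_magicalArrays; infer_instance

-- ===== CLAIM (what is proved, stated in full; the proofs are below) =====
def Claim_equal_magicalArrays : Prop := ∀ (arr : List Int), Dom_magicalArrays arr → Spec_magicalArrays arr (magicalArrays arr)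

-- ===== LEMMAS AND PROOFS =====

-- residual count added by B's pass from state (prev, run)
def pvS (p : Option Int) (r : Int) : List Int → Int
  | [] => 0
  | x :: xs => (if some x = p then r + 1 else 1) + pvS (some x) (if some x = p then r + 1 else 1) xs

theorem pvS_foldl (xs : List Int) : ∀ (p : Option Int) (r c : Int),
    (xs.foldl
      (fun (s : Option Int × Int × Int) x =>
        let run : Int := if some x = s.1 then s.2.1 + 1 else 1
        (some x, run, s.2.2 + run))
      (p, r, c)).2.2 = c + pvS p r xs := by
  induction xs with
  | nil => intro p r c; simp [pvS]
  | cons x xs ih =>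
    intro p r c
    simp only [List.foldl_cons, pvS, ih]
    ring

def pvTri (k : Nat) : Int := ((k * (k + 1) / 2 : Nat) : Int)

theorem pvTri_succ (k : Nat) : pvTri (k + 1) = pvTri k + (k + 1) := by
  unfold pvTri
  have hev : k * (k + 1) % 2 = 0 := by
    rcases Nat.even_mul_succ_self k with ⟨m, hm⟩
    omega
  have h3 : (k + 1) * (k + 2) = k * (k + 1) + 2 * (k + 1) := by ring
  have : (k + 1) * ((k + 1) + 1) / 2 = k * (k + 1) / 2 + (k + 1) := by
    rw [show (k+1)+1 = k+2 from rfl, h3]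
    omega
  rw [this]
  push_cast
  ring

theorem pvS_run (t : List Int) : ∀ (v r : Int) (d : List Int), (∀ y ∈ t, y = v) →
    pvS (some v) r (t ++ d) = t.length * r + pvTri t.length + pvS (some v) (r + t.length) d := by
  induction t with
  | nil => intro v r d _; simp [pvTri]
  | cons y t ih =>
    intro v r d hall
    have hy : y = v := hall y (List.mem_cons_self)
    subst hy
    simp only [List.cons_append, pvS, if_true]
    rw [ih y (r + 1) d (fun z hz => hall z (List.mem_cons_of_mem _ hz))]
    have harg : r + ((t.length + 1 : Nat) : Int) = r + 1 + (t.length : Int) := by push_cast; ring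
    simp only [List.length_cons, harg]
    rw [pvTri_succ]
    push_cast
    ring

theorem pvS_switch (d : List Int) (p q : Option Int) (r s : Int)
    (h : ∀ x, d.head? = some x → some x ≠ p ∧ some x ≠ q) :
    pvS p r d = pvS q s d := by
  cases d with
  | nil => rfl
  | cons x xs =>
    obtain ⟨h1, h2⟩ := h x rfl
    simp [pvS, h1, h2]

-- with enough fuel, the inner loop stops at the end of the run of v starting at j
theorem magicalArraysInner_eq (arr : List Int) (v : Int) : ∀ (fuel j : Nat),
    arr.length - j ≤ fuel →
    magicalArraysInner arr v j fuel = j + ((arr.drop j).takeWhile (fun y => y == v)).length := by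
  intro fuel
  induction fuel with
  | zero =>
    intro j hf
    rw [List.drop_eq_nil_of_le (by omega)]
    simp [magicalArraysInner]
  | succ fuel ih =>
    intro j hf
    by_cases hj : j < arr.length
    · by_cases hv : arr.getD j 0 = v
      · simp only [magicalArraysInner, if_pos (show j < arr.length ∧ arr.getD j 0 = v from ⟨hj, hv⟩)]
        rw [ih (j + 1) (by omega), List.drop_eq_getElem_cons hj]
        have hjv : arr[j] = v := by rwa [List.getD_eq_getElem _ _ hj] at hv
        simp [hjv]
        omega
      · simp only [magicalArraysInner, if_neg (by tauto : ¬ (j < arr.length ∧ arr.getD j 0 = v))]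
        rw [List.drop_eq_getElem_cons hj]
        have hjv : ¬ arr[j] = v := by rwa [List.getD_eq_getElem _ _ hj] at hv
        simp [hjv]
    · simp only [magicalArraysInner, if_neg (by tauto : ¬ (j < arr.length ∧ arr.getD j 0 = v))]
      rw [List.drop_eq_nil_of_le (by omega)]
      simp

theorem magicalArraysOuter_eq (arr : List Int) : ∀ (fuel i : Nat) (c : Int),
    arr.length - i < fuel →
    magicalArraysOuter arr i c fuel = c + pvS none 0 (arr.drop i) := by
  intro fuel
  induction fuel with
  | zero => intro i c hf; exact absurd hf (Nat.not_lt_zero _)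
  | succ fuel ih =>
    intro i c hf
    by_cases hi : i < arr.length
    · simp only [magicalArraysOuter, if_pos hi]
      set v := arr.getD i 0 with hv
      set k := ((arr.drop (i+1)).takeWhile (fun y => y == v)).length with hk
      have hvi : arr[i] = v := by rw [hv, List.getD_eq_getElem _ _ hi]
      have hjeq : magicalArraysInner arr v i (arr.length - i) = i + 1 + k := by
        rw [magicalArraysInner_eq arr v (arr.length - i) i (by omega), List.drop_eq_getElem_cons hi]
        simp [hvi, ← hk]
        omega
      rw [hjeq]
      rw [ih (i + 1 + k) _ (by omega)]
      have hl : ((i + 1 + k : Nat) : Int) - (i : Nat) = (k : Int) + 1 := by push_cast; ring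
      rw [hl]
      have hsplit : arr.drop (i+1) =
          (arr.drop (i+1)).takeWhile (fun y => y == v) ++ (arr.drop (i+1)).dropWhile (fun y => y == v) :=
        (List.takeWhile_append_dropWhile).symm
      have hdropj : arr.drop (i + 1 + k) = (arr.drop (i+1)).dropWhile (fun y => y == v) := by
        have hdd : arr.drop (i + 1 + k) = (arr.drop (i+1)).drop k := by
          rw [List.drop_drop]
        rw [hdd]
        conv_lhs => rw [hsplit]
        rw [List.drop_left' (by rw [hk])]
      have hall : ∀ y ∈ (arr.drop (i+1)).takeWhile (fun y => y == v), y = v := by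
        intro y hy
        have := List.mem_takeWhile_imp hy
        simpa using this
      have hRHS : pvS none 0 (arr.drop i) =
          1 + (↑k * 1 + pvTri k + pvS (some v) (1 + ↑k) ((arr.drop (i+1)).dropWhile (fun y => y == v))) := by
        rw [List.drop_eq_getElem_cons hi]
        simp only [pvS, reduceCtorEq, if_false]
        rw [hvi]
        conv_lhs => rw [hsplit]
        rw [pvS_run _ v 1 _ hall, ← hk]
      have hswitch : pvS (some v) (1 + ↑k) ((arr.drop (i+1)).dropWhile (fun y => y == v)) =
          pvS none 0 ((arr.drop (i+1)).dropWhile (fun y => y == v)) := by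
        apply pvS_switch
        intro x hx
        have hhead := List.head?_dropWhile_not (fun y => y == v) (arr.drop (i+1))
        rw [hx] at hhead
        simp at hhead
        exact ⟨by simpa using hhead, by simp⟩
      have hfd : PySem.Int.floordiv (((k : Int) + 1) * (((k : Int) + 1) + 1)) 2 = pvTri (k + 1) := by
        have h1 : ((k : Int) + 1) * (((k : Int) + 1) + 1) = (((k + 1) * ((k + 1) + 1) : Nat) : Int) := by
          push_cast; ring
        rw [h1, show (2:Int) = ((2:Nat):Int) from by norm_num, PySem.Int.floordiv_natCast]
        rfl
      rw [hfd, hdropj, hRHS, hswitch, pvTri_succ]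
      ring
    · simp only [magicalArraysOuter, if_neg hi]
      rw [List.drop_eq_nil_of_le (by omega)]
      simp [pvS]

-- ===== VERDICT (by name: the statement is the Claim_ definition above) =====
theorem magicalArrays_spec : Claim_equal_magicalArrays := by
  intro arr _
  unfold Spec_magicalArrays magicalArrays magicalArrays_alt
  rw [magicalArraysOuter_eq arr (arr.length + 1) 0 0 (by omega), pvS_foldl]
  simp
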